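-- pv_equiv track=rewrite | github.com/zaharevic/Crypto1 | algorithmChecker.py | second_algorithm
-- ===== SOURCE A (Python) =====
-- from xmlrpc.client import boolean
--
-- def second_algorithm(numbers):
--     result = 0
--     big_num_counter = 0
--     i = 0
--     for number in numbers:
--         if number > 4:
--             big_num_counter += 1
--         if (i % 2) == 0:
--             result += number * 2
--         else:
--             result += number
--         i += 1
--     return not boolean((result % 10) + big_num_counter)
-- ===== SOURCE B (Python) =====
-- def second_algorithm(numbers):
--     nums = list(numbers)
--     big = sum(1 for n in nums if n > 4)
--     result = 0
--     i = 0
--     while i < len(nums):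
--         result += 2 * nums[i]
--         if i + 1 < len(nums):
--             result += nums[i + 1]
--         i += 2
--     return result % 10 + big == 0
-- ===== Notes on version B (the rewrite author's own statement) =====
-- stated objective: alternative
-- what changed: B separates the big-number count into its own pass and computes the weighted sum by consuming the list two elements at a time (double the first of each pair, add the second), removing A's per-element index counter and parity branch and the running mixed state.
import Mathlib
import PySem

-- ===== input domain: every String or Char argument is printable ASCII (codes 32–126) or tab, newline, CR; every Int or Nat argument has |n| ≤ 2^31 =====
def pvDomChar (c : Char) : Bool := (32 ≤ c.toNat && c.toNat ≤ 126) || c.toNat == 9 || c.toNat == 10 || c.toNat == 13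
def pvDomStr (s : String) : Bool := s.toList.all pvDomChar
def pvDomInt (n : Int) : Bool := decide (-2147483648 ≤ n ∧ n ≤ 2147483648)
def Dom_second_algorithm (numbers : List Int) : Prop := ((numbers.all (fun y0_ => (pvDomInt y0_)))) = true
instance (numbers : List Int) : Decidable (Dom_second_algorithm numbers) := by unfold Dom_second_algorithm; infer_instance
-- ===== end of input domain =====

-- B computes the big-number count in its own pass and the weighted sum pairwise (2*first + second per pair), replacing A's index counter and parity branch; same O(n) cost (objective: alternative).


-- ===== PORT A =====
-- loop state (result, big_num_counter, i); i stays ≥ 0 so Lean's % agrees with Python's on i % 2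
def second_algorithm (numbers : List Int) : Bool :=
  let s := numbers.foldl (fun (st : Int × Int × Int) number =>
    let big := if number > 4 then st.2.1 + 1 else st.2.1
    let result := if st.2.2 % 2 = 0 then st.1 + number * 2 else st.1 + number
    (result, big, st.2.2 + 1)) (0, 0, 0)
  -- not boolean(x) for int x is (x == 0)
  decide (PySem.Int.mod s.1 10 + s.2.1 = 0)

-- ===== PORT B =====
-- big = sum(1 for n in nums if n > 4)
def altBig (nums : List Int) : Int := ((nums.filter (fun n => n > 4)).length : Int)
-- the while loop over i, i+1, step 2: consumes the list two elements at a time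
def altWSum : List Int → Int
  | [] => 0
  | [a] => 2 * a
  | a :: b :: rest => 2 * a + b + altWSum rest

def second_algorithm_alt (numbers : List Int) : Bool :=
  decide (PySem.Int.mod (altWSum numbers) 10 + altBig numbers = 0)

-- ===== PRECONDITION & SPEC =====
def Spec_second_algorithm (numbers : List Int) (out : Bool) : Prop := out = second_algorithm_alt numbers
instance (numbers : List Int) (out : Bool) : Decidable (Spec_second_algorithm numbers out) := by unfold Spec_second_algorithm; infer_instance

-- ===== CLAIM (what is proved, stated in full; the proofs are below) =====
def Claim_equal_second_algorithm : Prop := ∀ (numbers : List Int), Dom_second_algorithm numbers → Spec_second_algorithm numbers (second_algorithm numbers)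

-- ===== LEMMAS AND PROOFS =====

-- A's fold, started at an even index, sums to the start state plus B's two quantities
lemma second_algorithm_loop (l : List Int) : ∀ (result big i : Int), i % 2 = 0 →
    l.foldl (fun (st : Int × Int × Int) number =>
      let bg := if number > 4 then st.2.1 + 1 else st.2.1
      let rs := if st.2.2 % 2 = 0 then st.1 + number * 2 else st.1 + number
      (rs, bg, st.2.2 + 1)) (result, big, i)
    = (result + altWSum l, big + altBig l, i + (l.length : Int)) := by
  induction l using altWSum.induct with
  | case1 => intro result big i _; simp [altWSum, altBig]
  | case2 a =>
      intro result big i hi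
      simp only [List.foldl, if_pos hi, altWSum, altBig]
      split <;> simp [List.filter, *] <;> ring
  | case3 a b rest ih =>
      intro result big i hi
      have h3 : ¬ ((i + 1) % 2 = 0) := by omega
      simp only [List.foldl, if_pos hi, if_neg h3]
      rw [ih _ _ _ (by omega)]
      simp only [altWSum, altBig, List.filter, List.length, Prod.mk.injEq]
      refine ⟨by ring, ?_, by push_cast; ring⟩
      split <;> split <;> simp [*] <;> omega

-- ===== VERDICT (by name: the statement is the Claim_ definition above) =====
theorem second_algorithm_spec : Claim_equal_second_algorithm := by
  intro numbers _
  unfold Spec_second_algorithm second_algorithm second_algorithm_alt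
  rw [second_algorithm_loop numbers 0 0 0 (by decide)]
  simp
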